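-- pv_equiv track=rewrite | github.com/vivekgsheth/DSA-Python | k_sum_subsequence.py | one_subseq
-- ===== SOURCE A (Python) =====
-- def one_subseq(idx, ds, s, k, arr, n, result) -> bool:
--
--     if idx >= n:
--
--         # Condition satisfied
--         if s == k:
--             result.append(ds.copy())
--             return True
--
--         # Condition not satisfied
--         return False
--
--     # Include
--     ds.append(arr[idx])
--     s += arr[idx]
--
--     if one_subseq(idx+1, ds, s, k, arr, n, result) == True:
--         return True
--
--     ds.remove(arr[idx])
--     s -= arr[idx]
--
--     # Exclude
--     if one_subseq(idx+1, ds, s, k, arr, n, result) == True: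
--         return True
--
--     return False
-- ===== SOURCE B (Python) =====
-- # B: iterative reachable-sums set (O(n * #distinct sums)) instead of A's O(2^n) include/exclude DFS.
-- # Equivalence is about the RETURN value only: A also mutates ds and result in place; B does not.
-- def one_subseq(idx, ds, s, k, arr, n, result) -> bool:
--     sums = {s}
--     for i in range(idx, n):
--         x = arr[i]
--         sums |= {t + x for t in sums}
--     return k in sums
-- ===== Notes on version B (the rewrite author's own statement) =====
-- stated objective: faster
-- what changed: Replaces the exponential include/exclude DFS by a single forward pass maintaining the set of reachable partial sums, answering 'k reachable?' at the end; ds/result are no longer mutated (return value unchanged).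
import Mathlib
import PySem

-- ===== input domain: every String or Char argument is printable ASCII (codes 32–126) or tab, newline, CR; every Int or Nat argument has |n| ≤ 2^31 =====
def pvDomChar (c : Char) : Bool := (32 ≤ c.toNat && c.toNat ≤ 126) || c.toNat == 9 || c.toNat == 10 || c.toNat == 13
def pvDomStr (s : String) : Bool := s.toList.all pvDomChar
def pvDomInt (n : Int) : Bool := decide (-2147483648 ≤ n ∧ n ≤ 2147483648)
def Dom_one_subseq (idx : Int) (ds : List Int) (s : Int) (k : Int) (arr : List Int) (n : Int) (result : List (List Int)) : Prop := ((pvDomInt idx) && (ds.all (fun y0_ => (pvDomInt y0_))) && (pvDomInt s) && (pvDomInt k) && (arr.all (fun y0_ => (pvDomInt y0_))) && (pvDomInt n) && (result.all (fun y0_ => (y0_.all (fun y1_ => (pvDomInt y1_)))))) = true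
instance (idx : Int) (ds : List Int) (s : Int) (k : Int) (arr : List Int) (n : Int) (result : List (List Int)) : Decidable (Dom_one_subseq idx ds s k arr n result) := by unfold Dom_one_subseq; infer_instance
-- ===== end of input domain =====

-- B replaces A's exponential include/exclude DFS by one forward pass over the set of reachable
-- partial sums (objective: faster). Equivalence is about the RETURN value only: A mutates ds and
-- result in place, B does not.

-- ===== PORT A =====
-- Literal port of A's recursion. The Python mutates ds (append/remove) and result (append in the
-- base case); only the Bool return is modeled, so the base case drops the result.append and the
-- mutated ds is threaded through the recursive calls. 's += x … s -= x' restores s, so the exclude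
-- call receives the original s. arr[idx] is PySem.List.pyGet?; 'none' is Python's IndexError
-- (excluded by Pre_one_subseq), the branch returns false only to totalize.
def one_subseq (idx : Int) (ds : List Int) (s : Int) (k : Int) (arr : List Int) (n : Int) (result : List (List Int)) : Bool :=
  if h : n ≤ idx then
    decide (s = k)
  else
    match PySem.List.pyGet? arr idx with
    | none => false
    | some x =>
      if one_subseq (idx + 1) (ds ++ [x]) (s + x) k arr n result then true
      else
        let ds' := (PySem.List.remove? (ds ++ [x]) x).getD (ds ++ [x])
        if one_subseq (idx + 1) ds' s k arr n result then true
        else false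
termination_by (n - idx).toNat
decreasing_by all_goals omega

-- ===== PORT B =====
-- Port of Source B: sums = {s}; for i in range(idx, n): sums |= {t + arr[i] for t in sums}; return k in sums.
-- arr[i] is pyGet? with a default (never taken inside Pre_one_subseq, where every index is in range).
def one_subseq_alt (idx : Int) (ds : List Int) (s : Int) (k : Int) (arr : List Int) (n : Int) (result : List (List Int)) : Bool :=
  let sums := (PySem.List.pyRange idx n 1).foldl
    (fun acc i =>
      let x := (PySem.List.pyGet? arr i).getD 0
      PySem.Set.union acc (PySem.Set.ofList (acc.map (fun t => t + x))))
    (PySem.Set.ofList [s])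
  PySem.Set.contains sums k

-- ===== PRECONDITION & SPEC =====
-- Pre_ is exactly where the Python A returns: it raises IndexError iff idx < n and some index in
-- range(idx, n) is outside Python's index range for arr (n > len(arr) or idx < -len(arr)).
def Pre_one_subseq (idx : Int) (ds : List Int) (s : Int) (k : Int) (arr : List Int) (n : Int) (result : List (List Int)) : Prop :=
  n ≤ idx ∨ (-(arr.length : Int) ≤ idx ∧ n ≤ (arr.length : Int))
instance (idx : Int) (ds : List Int) (s : Int) (k : Int) (arr : List Int) (n : Int) (result : List (List Int)) : Decidable (Pre_one_subseq idx ds s k arr n result) := by unfold Pre_one_subseq; infer_instance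

def pvWitness_one_subseq : Int × List Int × Int × Int × List Int × Int × List (List Int) := (0, [], 0, 3, [1, 2], 2, [])

def Spec_one_subseq (idx : Int) (ds : List Int) (s : Int) (k : Int) (arr : List Int) (n : Int) (result : List (List Int)) (out : Bool) : Prop := out = one_subseq_alt idx ds s k arr n result
instance (idx : Int) (ds : List Int) (s : Int) (k : Int) (arr : List Int) (n : Int) (result : List (List Int)) (out : Bool) : Decidable (Spec_one_subseq idx ds s k arr n result out) := by unfold Spec_one_subseq; infer_instance

-- ===== CLAIM (what is proved, stated in full; the proofs are below) =====
def Claim_equal_one_subseq : Prop := ∀ (idx : Int) (ds : List Int) (s : Int) (k : Int) (arr : List Int) (n : Int) (result : List (List Int)), Dom_one_subseq idx ds s k arr n result → Pre_one_subseq idx ds s k arr n result → Spec_one_subseq idx ds s k arr n result (one_subseq idx ds s k arr n result)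

-- ===== LEMMAS AND PROOFS =====

-- Reference recursion: 'from state s at position idx, can the suffix choices reach sum k?'
def pvReach (k : Int) (arr : List Int) (n : Int) (idx : Int) (s : Int) : Bool :=
  if _h : n ≤ idx then decide (s = k)
  else
    let x := (PySem.List.pyGet? arr idx).getD 0
    pvReach k arr n (idx + 1) (s + x) || pvReach k arr n (idx + 1) s
termination_by (n - idx).toNat
decreasing_by all_goals omega

-- A's return value ignores ds and result and equals pvReach, whenever every index it touches is in range.
theorem pvA_eq_reach (k : Int) (arr : List Int) (n : Int) :
    ∀ (m : Nat) (idx : Int) (ds : List Int) (s : Int) (result : List (List Int)),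
      (n - idx).toNat = m →
      (∀ i : Int, idx ≤ i → i < n → PySem.Raise.InRange arr.length i) →
      one_subseq idx ds s k arr n result = pvReach k arr n idx s := by
  intro m
  induction m with
  | zero =>
    intro idx ds s result hm _
    have h : n ≤ idx := by omega
    rw [one_subseq, pvReach]
    simp [h]
  | succ m ih =>
    intro idx ds s result hm hv
    by_cases h : n ≤ idx
    · rw [one_subseq, pvReach]; simp [h]
    · have hin : PySem.Raise.InRange arr.length idx := hv idx le_rfl (by omega)
      have hx : PySem.List.pyGet? arr idx ≠ none := by
        rw [Ne, PySem.List.pyGet?_eq_none_iff]; exact not_not_intro hin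
      obtain ⟨x, hxe⟩ := Option.ne_none_iff_exists'.mp hx
      have hv' : ∀ i : Int, idx + 1 ≤ i → i < n → PySem.Raise.InRange arr.length i :=
        fun i h1 h2 => hv i (by omega) h2
      rw [one_subseq, pvReach]
      simp only [h, dite_false, hxe, Option.getD_some]
      rw [ih (idx + 1) (ds ++ [x]) (s + x) result (by omega) hv',
          ih (idx + 1) ((PySem.List.remove? (ds ++ [x]) x).getD (ds ++ [x])) s result (by omega) hv']
      cases pvReach k arr n (idx + 1) (s + x) <;> cases pvReach k arr n (idx + 1) s <;> simp

-- B's fold over range(idx, n) reaches k from some seed in S iff pvReach does.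
theorem pvB_fold (k : Int) (arr : List Int) (n : Int) :
    ∀ (m : Nat) (idx : Int) (S : List Int),
      (n - idx).toNat = m →
      (k ∈ (PySem.List.pyRange idx n 1).foldl
        (fun acc i =>
          let x := (PySem.List.pyGet? arr i).getD 0
          PySem.Set.union acc (PySem.Set.ofList (acc.map (fun t => t + x)))) S
       ↔ ∃ t ∈ S, pvReach k arr n idx t = true) := by
  intro m
  induction m with
  | zero =>
    intro idx S hm
    have h : n ≤ idx := by omega
    rw [PySem.List.pyRange_one_eq_nil h]
    simp only [List.foldl_nil]
    constructor
    · intro hk; exact ⟨k, hk, by rw [pvReach]; simp [h]⟩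
    · rintro ⟨t, ht, hr⟩
      rw [pvReach] at hr; simp [h] at hr; subst hr; exact ht
  | succ m ih =>
    intro idx S hm
    by_cases h : n ≤ idx
    · exfalso; omega
    · rw [PySem.List.pyRange_one_cons (by omega), List.foldl_cons]
      rw [ih (idx + 1) _ (by omega)]
      constructor
      · rintro ⟨u, hu, hr⟩
        rw [PySem.Set.mem_union, PySem.Set.mem_ofList] at hu
        rcases hu with hu | hu
        · exact ⟨u, hu, by rw [pvReach]; simp [h, hr]⟩
        · obtain ⟨t, ht, hte⟩ := List.mem_map.mp hu
          subst hte
          exact ⟨t, ht, by rw [pvReach]; simp [h, hr]⟩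
      · rintro ⟨t, ht, hr⟩
        rw [pvReach] at hr
        simp [h] at hr
        rcases hr with hr | hr
        · exact ⟨t + (PySem.List.pyGet? arr idx).getD 0,
            (PySem.Set.mem_union _ _ _).mpr (Or.inr ((PySem.Set.mem_ofList _ _).mpr
              (List.mem_map.mpr ⟨t, ht, rfl⟩))), hr⟩
        · exact ⟨t, (PySem.Set.mem_union _ _ _).mpr (Or.inl ht), hr⟩

-- ===== VERDICT (by name: the statement is the Claim_ definition above) =====
theorem one_subseq_spec : Claim_equal_one_subseq := by
  intro idx ds s k arr n result _ hpre
  unfold Spec_one_subseq one_subseq_alt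
  have hv : ∀ i : Int, idx ≤ i → i < n → PySem.Raise.InRange arr.length i := by
    intro i h1 h2
    rcases hpre with h | ⟨hl, hr⟩
    · omega
    · exact ⟨by omega, by omega⟩
  rw [pvA_eq_reach k arr n (n - idx).toNat idx ds s result rfl hv]
  rw [Bool.eq_iff_iff]
  have hS : PySem.Set.ofList [s] = [s] := rfl
  rw [hS]
  rw [PySem.Set.contains, List.contains_iff_mem]
  rw [pvB_fold k arr n (n - idx).toNat idx [s] rfl]
  constructor
  · intro hr; exact ⟨s, List.mem_singleton.mpr rfl, hr⟩
  · rintro ⟨t, ht, hr⟩; rwa [List.mem_singleton.mp ht] at hr
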